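-- pv_equiv track=rewrite | github.com/pypi-data/pypi-mirror-400 | packages/rxiv-maker/rxiv_maker-1.18.3.tar.gz/rxiv_maker-1.18.3/src/rxiv_maker/validators/reference_validator.py | _is_inside_backticks
-- ===== SOURCE A (Python) =====
-- def _is_inside_backticks(line: str, position: int) -> bool:
--     """Check if a position in the line is inside backticks."""
--     # Find all backtick pairs in the line
--     backtick_positions = []
--     in_code = False
--     i = 0
--     while i < len(line):
--         if line[i] == "`":
--             # Handle double backticks
--             if i + 1 < len(line) and line[i + 1] == "`":
--                 backtick_positions.append((i, i + 1, not in_code))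
--                 in_code = not in_code
--                 i += 2
--             else:
--                 backtick_positions.append((i, i, not in_code))
--                 in_code = not in_code
--                 i += 1
--         else:
--             i += 1
--
--     # Check if position falls within any code span
--     in_code_span = False
--     for start, end, is_opening in backtick_positions:
--         if is_opening and start <= position:
--             in_code_span = True
--         elif not is_opening and end < position and in_code_span:
--             in_code_span = False
--
--     return in_code_span
-- ===== SOURCE B (Python) =====
-- def _is_inside_backticks(line: str, position: int) -> bool:
--     """Check if a position in the line is inside backticks."""
--     n = len(line)
--     i = 0
--     while i < n:
--         if line[i] != "`":
--             i += 1
--             continue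
--         start = i
--         i += 2 if (i + 1 < n and line[i + 1] == "`") else 1
--         # scan to the closing backtick of this span
--         while i < n and line[i] != "`":
--             i += 1
--         if i >= n:
--             # unclosed span extends to the end of the line (and beyond)
--             return position >= start
--         end = i + 1 if (i + 1 < n and line[i + 1] == "`") else i
--         if start <= position <= end:
--             return True
--         i = end + 1
--     return False
-- ===== Notes on version B (the rewrite author's own statement) =====
-- stated objective: alternative
-- what changed: B replaces A's two-phase token-list-plus-toggle-flag replay with a single scan that pairs each opening backtick directly with its closing backtick and returns as soon as the position falls in a span (or past an unclosed opener); it builds no intermediate list and usually exits early.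
import Mathlib
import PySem

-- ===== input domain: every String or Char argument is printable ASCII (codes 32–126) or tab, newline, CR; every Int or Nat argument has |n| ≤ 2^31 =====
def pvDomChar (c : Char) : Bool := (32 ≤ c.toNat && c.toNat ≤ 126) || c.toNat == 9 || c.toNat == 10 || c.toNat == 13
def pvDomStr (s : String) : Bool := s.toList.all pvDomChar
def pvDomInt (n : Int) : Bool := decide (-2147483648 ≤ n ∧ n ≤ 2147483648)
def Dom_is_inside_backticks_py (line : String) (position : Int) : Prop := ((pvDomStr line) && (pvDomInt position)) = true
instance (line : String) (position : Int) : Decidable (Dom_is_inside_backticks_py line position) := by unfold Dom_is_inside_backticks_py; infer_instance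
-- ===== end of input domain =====

-- B pairs each opening backtick token directly with its closing token in one scan and
-- answers with an early return, instead of A's token list + toggle-flag replay (objective: simpler).

-- ===== PORT A =====
-- first while loop of A: collect (start, end, is_opening) backtick tokens
def pvScanA : List Char → Nat → Bool → List (Nat × Nat × Bool)
  | [], _, _ => []
  | c :: rest, i, b =>
    if c = '`' then
      match rest with
      | c2 :: rest2 =>
        if c2 = '`' then (i, i + 1, !b) :: pvScanA rest2 (i + 2) (!b)
        else (i, i, !b) :: pvScanA (c2 :: rest2) (i + 1) (!b)
      | [] => (i, i, !b) :: pvScanA [] (i + 1) (!b)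
    else pvScanA rest (i + 1) b

-- body of A's second (for) loop
def pvStepA (position : Int) (acc : Bool) (t : Nat × Nat × Bool) : Bool :=
  if t.2.2 && decide ((t.1 : Int) ≤ position) then true
  else if !t.2.2 && decide ((t.2.1 : Int) < position) && acc then false
  else acc

def is_inside_backticks_py (line : String) (position : Int) : Bool :=
  (pvScanA line.toList 0 false).foldl (pvStepA position) false

-- ===== PORT B =====
-- B's inner while loop: index of the next backtick and the list from it
def pvSeek : List Char → Nat → Option (Nat × List Char)
  | [], _ => none
  | c :: rest, i => if c = '`' then some (i, c :: rest) else pvSeek rest (i + 1)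

theorem pvSeek_len : ∀ (cs : List Char) (i k : Nat) (ds : List Char),
    pvSeek cs i = some (k, ds) → ds.length ≤ cs.length := by
  intro cs
  induction cs with
  | nil => intro i k ds h; simp [pvSeek] at h
  | cons c rest ih =>
    intro i k ds h
    simp only [pvSeek] at h
    split at h
    · simp at h; simp [← h.2]
    · have := ih (i + 1) k ds h; simp; omega

-- `end = i + 1 if (i + 1 < n and line[i+1] == '`') else i` of B
def pvEnd (k : Nat) (ds : List Char) : Nat :=
  if ds.tail.head? = some '`' then k + 1 else k

def pvScanB : List Char → Nat → Int → Bool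
  | [], _, _ => false
  | c :: rest, i, pos =>
    if c ≠ '`' then pvScanB rest (i + 1) pos
    else
      match h : pvSeek (if rest.head? = some '`' then rest.tail else rest)
                       (if rest.head? = some '`' then i + 2 else i + 1) with
      | none => decide ((i : Int) ≤ pos)
      | some (k, ds) =>
        if decide ((i : Int) ≤ pos) && decide (pos ≤ (pvEnd k ds : Int)) then true
        else pvScanB (if ds.tail.head? = some '`' then ds.tail.tail else ds.tail)
                     (pvEnd k ds + 1) pos
termination_by cs _ _ => cs.length
decreasing_by
  · simp only [List.length_cons]; omega
  · have h1 := pvSeek_len _ _ _ _ h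
    have h2 : ds.length ≤ rest.length :=
      le_trans h1 (by split <;> simp [List.length_tail])
    have h3 : ds.tail.length ≤ ds.length := by simp [List.length_tail]
    have h4 : ds.tail.tail.length ≤ ds.tail.length := by simp [List.length_tail]
    split <;> simp only [List.length_cons] <;> omega

def is_inside_backticks_py_alt (line : String) (position : Int) : Bool :=
  pvScanB line.toList 0 position

-- ===== PRECONDITION & SPEC =====
def Spec_is_inside_backticks_py (line : String) (position : Int) (out : Bool) : Prop := out = is_inside_backticks_py_alt line position
instance (line : String) (position : Int) (out : Bool) : Decidable (Spec_is_inside_backticks_py line position out) := by unfold Spec_is_inside_backticks_py; infer_instance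

-- ===== CLAIM (what is proved, stated in full; the proofs are below) =====
def Claim_equal_is_inside_backticks_py : Prop := ∀ (line : String) (position : Int), Dom_is_inside_backticks_py line position → Spec_is_inside_backticks_py line position (is_inside_backticks_py line position)

-- ===== LEMMAS AND PROOFS =====

-- the bare (start, end) token list both programs traverse
def pvToks : List Char → Nat → List (Nat × Nat)
  | [], _ => []
  | c :: rest, i =>
    if c = '`' then
      match rest with
      | c2 :: rest2 =>
        if c2 = '`' then (i, i + 1) :: pvToks rest2 (i + 2)
        else (i, i) :: pvToks (c2 :: rest2) (i + 1)
      | [] => [(i, i)]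
    else pvToks rest (i + 1)

theorem pvToks_skip (c : Char) (rest : List Char) (i : Nat) (hc : ¬ c = '`') :
    pvToks (c :: rest) i = pvToks rest (i + 1) := by
  cases rest <;> simp [pvToks, hc]

def pvAttach : List (Nat × Nat) → Bool → List (Nat × Nat × Bool)
  | [], _ => []
  | (s, e) :: T, b => (s, e, b) :: pvAttach T (!b)

-- pairwise reading of the token list: inside some pair, or past an unclosed opener
def pvP (pos : Int) : List (Nat × Nat) → Bool
  | [] => false
  | [(s, _)] => decide ((s : Int) ≤ pos)
  | (s, _) :: (_, e) :: T => (decide ((s : Int) ≤ pos) && decide (pos ≤ (e : Int))) || pvP pos T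

def pvInv : Nat → List (Nat × Nat) → Prop
  | _, [] => True
  | i, (s, e) :: T => i ≤ s ∧ s ≤ e ∧ pvInv (e + 1) T

theorem pvScanA_eq_attach : ∀ (cs : List Char) (i : Nat) (b : Bool),
    pvScanA cs i b = pvAttach (pvToks cs i) (!b) := by
  intro cs i b
  fun_induction pvToks cs i generalizing b with
  | case1 i => cases b <;> simp [pvScanA, pvAttach]
  | case2 i rest2 ih => cases b <;> simp_all [pvScanA, pvAttach]
  | case3 i c2 rest2 hc2 ih => cases b <;> simp_all [pvScanA, pvAttach]
  | case4 i => cases b <;> simp [pvScanA, pvAttach]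
  | case5 c rest i hc ih =>
      have hu : pvScanA (c :: rest) i b = pvScanA rest (i + 1) b := by
        cases rest <;> simp [pvScanA, hc]
      rw [hu, ih]

theorem pvInv_le : ∀ (T : List (Nat × Nat)) (i j : Nat), j ≤ i → pvInv i T → pvInv j T := by
  intro T i j hj h
  cases T with
  | nil => trivial
  | cons p T => obtain ⟨h1, h2⟩ := h; exact ⟨le_trans hj h1, h2⟩

theorem pvInv_toks : ∀ (cs : List Char) (i : Nat), pvInv i (pvToks cs i) := by
  intro cs i
  fun_induction pvToks cs i with
  | case1 i => simp [pvInv]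
  | case2 i rest2 ih => exact ⟨le_refl _, by omega, pvInv_le _ _ _ (by omega) ih⟩
  | case3 i c2 rest2 hc2 ih => exact ⟨le_refl _, le_refl _, ih⟩
  | case4 i => exact ⟨le_refl _, le_refl _, trivial⟩
  | case5 i c rest hc ih => exact pvInv_le _ _ _ (by omega) ih

theorem pvStepA_open (pos : Int) (a : Bool) (s e : Nat) :
    pvStepA pos a (s, e, true) = (a || decide ((s : Int) ≤ pos)) := by
  cases a <;> simp [pvStepA]

theorem pvStepA_close (pos : Int) (a : Bool) (s e : Nat) :
    pvStepA pos a (s, e, false) = (a && !decide ((e : Int) < pos)) := by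
  cases a <;> simp [pvStepA]

theorem pvFoldA_true (pos : Int) : ∀ (T : List (Nat × Nat)) (i : Nat),
    pvInv i T → pos ≤ (i : Int) →
    (pvAttach T true).foldl (pvStepA pos) true = true := by
  intro T
  fun_induction pvP pos T with
  | case1 => intro i _ _; rfl
  | case2 s e => intro i _ _; simp [pvAttach, pvStepA_open]
  | case3 s e1 s2 e2 T ih =>
      intro i hinv hle
      simp [pvInv] at hinv
      obtain ⟨h1, h2, h3, h4, h5⟩ := hinv
      simp only [pvAttach, List.foldl_cons, Bool.not_true, Bool.not_false,
        pvStepA_open, pvStepA_close, Bool.true_or, Bool.true_and]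
      have hd : decide ((e2 : Int) < pos) = false := by simp; omega
      rw [hd]
      simpa using ih (e2 + 1) h5 (by push_cast at hle ⊢; omega)

theorem pvFoldA_false (pos : Int) : ∀ (T : List (Nat × Nat)) (i : Nat),
    pvInv i T →
    (pvAttach T true).foldl (pvStepA pos) false = pvP pos T := by
  intro T
  fun_induction pvP pos T with
  | case1 => intro i _; rfl
  | case2 s e => intro i _; simp [pvAttach, pvStepA_open]
  | case3 s e1 s2 e2 T ih =>
      intro i hinv
      simp [pvInv] at hinv
      obtain ⟨h1, h2, h3, h4, h5⟩ := hinv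
      simp only [pvAttach, List.foldl_cons, Bool.not_true, Bool.not_false,
        pvStepA_open, pvStepA_close, Bool.false_or]
      by_cases ha : ((s : Int) ≤ pos ∧ pos ≤ (e2 : Int))
      · have d1 : decide ((s : Int) ≤ pos) = true := by simp [ha.1]
        have d2 : decide ((e2 : Int) < pos) = false := by simp; omega
        rw [d1, d2]
        simp only [Bool.not_false, Bool.true_and]
        rw [pvFoldA_true pos T (e2 + 1) h5 (by push_cast; omega)]
        simp [ha.2]
      · push Not at ha
        have hacc : (decide ((s : Int) ≤ pos) && !decide ((e2 : Int) < pos)) = false := by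
          simp only [Bool.and_eq_false_iff, Bool.not_eq_false', decide_eq_true_eq,
            decide_eq_false_iff_not, not_le]
          by_cases hs : (s : Int) ≤ pos
          · right; have := ha hs; omega
          · left; simpa using hs
        rw [hacc]
        have hP : (decide ((s : Int) ≤ pos) && decide (pos ≤ (e2 : Int))) = false := by
          simp only [Bool.and_eq_false_iff, decide_eq_false_iff_not, not_le]
          by_cases hs : (s : Int) ≤ pos
          · right; have := ha hs; omega
          · left; simpa using hs
        rw [hP]
        simpa using ih (e2 + 1) h5

theorem pvSeek_none : ∀ (cs : List Char) (i : Nat),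
    pvSeek cs i = none → pvToks cs i = [] := by
  intro cs
  induction cs with
  | nil => intro i _; rfl
  | cons c rest ih =>
      intro i h
      simp only [pvSeek] at h
      split at h
      · simp at h
      · next hc => rw [pvToks_skip _ _ _ hc]; exact ih _ h

theorem pvSeek_some : ∀ (cs : List Char) (i k : Nat) (ds : List Char),
    pvSeek cs i = some (k, ds) → pvToks cs i = pvToks ds k ∧ ds.head? = some '`' := by
  intro cs
  induction cs with
  | nil => intro i k ds h; simp [pvSeek] at h
  | cons c rest ih =>
      intro i k ds h
      simp only [pvSeek] at h
      split at h
      · next hc => simp at h; subst hc; rw [← h.1, ← h.2]; simp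
      · next hc => rw [pvToks_skip _ _ _ hc]; exact ih _ _ _ h

theorem pvToks_tick (rest : List Char) (i : Nat) :
    pvToks ('`' :: rest) i =
      (i, if rest.head? = some '`' then i + 1 else i) ::
        pvToks (if rest.head? = some '`' then rest.tail else rest)
               (if rest.head? = some '`' then i + 2 else i + 1) := by
  cases rest with
  | nil => simp [pvToks]
  | cons c2 rest2 =>
      by_cases hc2 : c2 = '`' <;> simp [pvToks, hc2]

theorem pvScanB_eq_P : ∀ (cs : List Char) (i : Nat) (pos : Int),
    pvScanB cs i pos = pvP pos (pvToks cs i) := by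
  intro cs i pos
  fun_induction pvScanB cs i pos with
  | case1 => rfl
  | case2 c rest i pos hc ih =>
      rw [ih, pvToks_skip _ _ _ (by simpa using hc)]
  | case3 c rest i pos hc h =>
      obtain rfl : c = '`' := by simpa using hc
      simp only [dite_eq_ite] at *
      rw [pvToks_tick, pvSeek_none _ _ h]
      rfl
  | case4 c rest i pos hc k ds h hcmp =>
      obtain rfl : c = '`' := by simpa using hc
      simp only [dite_eq_ite] at *
      obtain ⟨ht, hd⟩ := pvSeek_some _ _ _ _ h
      rw [pvToks_tick, ht]
      obtain ⟨ds', rfl⟩ : ∃ ds', ds = '`' :: ds' := by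
        cases ds with
        | nil => simp at hd
        | cons a b => simp at hd; exact ⟨b, by rw [hd]⟩
      rw [pvToks_tick]
      simp only [pvEnd, List.tail_cons] at hcmp
      simp only [pvP]
      by_cases hdd : ds'.head? = some '`' <;> simp_all
  | case5 c rest i pos hc k ds h hcmp ih =>
      obtain rfl : c = '`' := by simpa using hc
      simp only [dite_eq_ite] at *
      obtain ⟨ht, hd⟩ := pvSeek_some _ _ _ _ h
      rw [pvToks_tick, ht]
      obtain ⟨ds', rfl⟩ : ∃ ds', ds = '`' :: ds' := by
        cases ds with
        | nil => simp at hd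
        | cons a b => simp at hd; exact ⟨b, by rw [hd]⟩
      rw [pvToks_tick]
      simp only [pvEnd, List.tail_cons] at hcmp ih ⊢
      simp only [pvP]
      rw [ih]
      by_cases hdd : ds'.head? = some '`' <;> simp_all


-- ===== VERDICT (by name: the statement is the Claim_ definition above) =====
theorem is_inside_backticks_py_spec : Claim_equal_is_inside_backticks_py := by
  intro line pos _
  unfold Spec_is_inside_backticks_py is_inside_backticks_py is_inside_backticks_py_alt
  rw [pvScanA_eq_attach, pvScanB_eq_P]
  simpa using pvFoldA_false pos (pvToks line.toList 0) 0 (pvInv_toks _ _)
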